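-- pv_equiv track=rewrite | github.com/Satyasiddardha/PQC_migration | backend/engines/migration_advisor.py | find_migration_rule
-- ===== SOURCE A (Python) =====
-- def find_migration_rule(algo: str, key_size: str, migration_map: list) -> dict:
--     """Find the best matching migration rule for an algorithm."""
--     # Try exact match with key size first
--     for rule in migration_map:
--         classical = rule.get("classical", "").upper()
--         if key_size and classical == f"{algo}-{key_size.replace('-bit', '').replace(' (assumed)', '')}":
--             return rule
--
--     # Try algorithm name match
--     for rule in migration_map:
--         classical = rule.get("classical", "").upper()
--         if classical == algo or classical.startswith(algo):
--             return rule
--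
--     # Try partial match
--     for rule in migration_map:
--         classical = rule.get("classical", "").upper()
--         if algo in classical or classical in algo:
--             return rule
--
--     return None
-- ===== SOURCE B (Python) =====
-- def find_migration_rule(algo: str, key_size: str, migration_map: list) -> dict:
--     """Single pass: early-return on exact match, remember first name/partial hits."""
--     target = f"{algo}-{key_size.replace('-bit', '').replace(' (assumed)', '')}"
--     name_hit = None
--     partial_hit = None
--     for rule in migration_map:
--         classical = rule.get("classical", "").upper()
--         if key_size and classical == target:
--             return rule
--         if name_hit is None and classical.startswith(algo):
--             name_hit = rule
--         if partial_hit is None and (algo in classical or classical in algo):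
--             partial_hit = rule
--     return name_hit if name_hit is not None else partial_hit
-- ===== Notes on version B (the rewrite author's own statement) =====
-- stated objective: faster
-- what changed: Replaces A's three full scans over migration_map by a single pass that precomputes the exact-match target string once, early-returns on an exact key-size match and records only the first name-tier and first partial-tier hits, resolving the tiers after the loop.
import Mathlib
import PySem

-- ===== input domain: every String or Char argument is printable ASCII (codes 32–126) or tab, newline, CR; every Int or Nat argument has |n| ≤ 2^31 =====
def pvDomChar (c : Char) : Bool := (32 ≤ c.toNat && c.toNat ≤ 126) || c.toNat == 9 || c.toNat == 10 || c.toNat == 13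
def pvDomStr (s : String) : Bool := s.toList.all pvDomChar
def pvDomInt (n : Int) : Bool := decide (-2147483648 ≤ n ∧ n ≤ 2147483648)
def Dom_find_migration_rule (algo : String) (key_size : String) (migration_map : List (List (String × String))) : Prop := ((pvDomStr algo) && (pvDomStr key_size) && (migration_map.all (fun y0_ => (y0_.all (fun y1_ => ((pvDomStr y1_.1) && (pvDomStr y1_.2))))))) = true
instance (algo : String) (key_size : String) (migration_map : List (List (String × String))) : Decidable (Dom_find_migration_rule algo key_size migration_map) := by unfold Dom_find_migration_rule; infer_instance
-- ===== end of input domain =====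

-- B folds A's three scans over migration_map into one pass (target precomputed, exact match early-returns, first name/partial hits recorded); objective: alternative.


-- shared helper: rule.get("classical", "").upper()  (assoc-list lookup = first match)
def pvClassical (rule : List (String × String)) : String :=
  PySem.Str.upper (((rule.find? (fun kv => kv.1 == "classical")).map (fun kv => kv.2)).getD "")

-- shared helper: f"{algo}-{key_size.replace('-bit','').replace(' (assumed)','')}"
def pvTarget (algo : String) (key_size : String) : String :=
  PySem.Str.join "" [algo, "-", PySem.Str.replace (PySem.Str.replace key_size "-bit" "") " (assumed)" ""]

-- ===== PORT A =====
-- three successive scans, each returning the first rule its tier matches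
def find_migration_rule (algo : String) (key_size : String) (migration_map : List (List (String × String))) : Option (List (String × String)) :=
  match migration_map.find? (fun rule => !(key_size == "") && (pvClassical rule == pvTarget algo key_size)) with
  | some rule => some rule
  | none =>
    match migration_map.find? (fun rule => (pvClassical rule == algo) || PySem.Str.startswith (pvClassical rule) algo) with
    | some rule => some rule
    | none =>
      migration_map.find? (fun rule => PySem.Str.isIn algo (pvClassical rule) || PySem.Str.isIn (pvClassical rule) algo)

-- ===== PORT B =====
-- one pass: early return on exact hit; nh/ph hold the first name-tier / partial-tier rules
def pvLoopB (algo : String) (target : String) (kz : Bool) :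
    List (List (String × String)) → Option (List (String × String)) → Option (List (String × String)) → Option (List (String × String))
  | [], nh, ph => match nh with | some r => some r | none => ph
  | rule :: rest, nh, ph =>
    let c := pvClassical rule
    if kz && (c == target) then some rule
    else
      pvLoopB algo target kz rest
        (if nh.isNone && PySem.Str.startswith c algo then some rule else nh)
        (if ph.isNone && (PySem.Str.isIn algo c || PySem.Str.isIn c algo) then some rule else ph)

def find_migration_rule_alt (algo : String) (key_size : String) (migration_map : List (List (String × String))) : Option (List (String × String)) :=
  pvLoopB algo (pvTarget algo key_size) (!(key_size == "")) migration_map none none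

-- ===== PRECONDITION & SPEC =====
def Spec_find_migration_rule (algo : String) (key_size : String) (migration_map : List (List (String × String))) (out : Option (List (String × String))) : Prop := out = find_migration_rule_alt algo key_size migration_map
instance (algo : String) (key_size : String) (migration_map : List (List (String × String))) (out : Option (List (String × String))) : Decidable (Spec_find_migration_rule algo key_size migration_map out) := by unfold Spec_find_migration_rule; infer_instance

-- ===== CLAIM (what is proved, stated in full; the proofs are below) =====
def Claim_equal_find_migration_rule : Prop := ∀ (algo : String) (key_size : String) (migration_map : List (List (String × String))), Dom_find_migration_rule algo key_size migration_map → Spec_find_migration_rule algo key_size migration_map (find_migration_rule algo key_size migration_map)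

-- ===== LEMMAS AND PROOFS =====

-- B's loop, characterised by three find?s with its accumulators spliced in
theorem pvLoopB_eq (algo target : String) (kz : Bool) (xs : List (List (String × String)))
    (nh ph : Option (List (String × String))) :
    pvLoopB algo target kz xs nh ph =
      ((xs.find? (fun rule => kz && (pvClassical rule == target))).or
        ((nh.or (xs.find? (fun rule => PySem.Str.startswith (pvClassical rule) algo))).or
          (ph.or (xs.find? (fun rule => PySem.Str.isIn algo (pvClassical rule) || PySem.Str.isIn (pvClassical rule) algo))))) := by
  induction xs generalizing nh ph with
  | nil => cases nh <;> cases ph <;> simp [pvLoopB]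
  | cons rule rest ih =>
    by_cases he : (kz && (pvClassical rule == target)) = true
    · simp [pvLoopB, List.find?_cons, he]
    · rw [show pvLoopB algo target kz (rule :: rest) nh ph =
          pvLoopB algo target kz rest
            (if nh.isNone && PySem.Str.startswith (pvClassical rule) algo then some rule else nh)
            (if ph.isNone && (PySem.Str.isIn algo (pvClassical rule) || PySem.Str.isIn (pvClassical rule) algo) then some rule else ph)
          from by simp [pvLoopB, he]]
      rw [ih]
      by_cases hn2 : PySem.Str.startswith (pvClassical rule) algo = true <;>
        by_cases hp2 : (PySem.Str.isIn algo (pvClassical rule) || PySem.Str.isIn (pvClassical rule) algo) = true <;>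
          cases nh <;> cases ph <;>
            simp_all [Option.or]

-- A's name-tier test 'classical == algo or classical.startswith(algo)' is exactly startswith
theorem pv_name_pred (algo : String) (rule : List (String × String)) :
    ((pvClassical rule == algo) || PySem.Str.startswith (pvClassical rule) algo)
      = PySem.Str.startswith (pvClassical rule) algo := by
  by_cases h : pvClassical rule = algo
  · have hs : PySem.Chars.startswith algo.toList algo.toList = true := by
      rw [PySem.Chars.startswith_iff]
    simp [h, hs]
  · simp [h]

-- ===== VERDICT (by name: the statement is the Claim_ definition above) =====
theorem find_migration_rule_spec : Claim_equal_find_migration_rule := by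
  intro algo key_size migration_map _
  unfold Spec_find_migration_rule find_migration_rule find_migration_rule_alt
  rw [pvLoopB_eq]
  have hpq : (fun rule => (pvClassical rule == algo) || PySem.Str.startswith (pvClassical rule) algo)
      = (fun rule => PySem.Str.startswith (pvClassical rule) algo) := funext (pv_name_pred algo)
  rw [hpq]
  cases migration_map.find? (fun rule => !(key_size == "") && (pvClassical rule == pvTarget algo key_size)) <;>
    cases migration_map.find? (fun rule => PySem.Str.startswith (pvClassical rule) algo) <;>
      simp [Option.or]
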